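-- pv_equiv track=rewrite | github.com/kukai10/PAD_AlgorithmicSolver | PAD2.py | filter_pos
-- ===== SOURCE A (Python) =====
-- def filter_pos(arr):
--     # from a list of position arrays, remove items that are overcounted, my method of looping over two scaling ratios can cause same objects to be overcounted
--     # this function is really just a safety measure, this function rarely finds overlapping objects
--     temp_list = []
--     for p in range(len(arr)-1):
--                     for k in range(p+1,len(arr)):
--                         if abs(arr[p][0][0]-arr[k][0][0]) < 5 and abs(arr[p][0][1]-arr[k][0][1]) < 5:
--                                 if k not in temp_list: temp_list.append(k)
--     if temp_list != []:
--         for s in reversed(sorted(temp_list)): del arr[s] # a bit of soring and organizing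
--     return arr
-- ===== SOURCE B (Python) =====
-- def filter_pos(arr):
--     # Same return value as the quadratic pairwise scan, via a spatial hash grid
--     # (cell size 5): each point only checks the 3x3 neighboring cells for an
--     # earlier point within distance < 5 in both coordinates.
--     # NOTE: unlike the original, this builds a new list instead of deleting
--     # from arr in place; the returned value is identical.
--     if len(arr) <= 1:
--         return arr
--     grid = {}
--     out = []
--     for item in arr:
--         x, y = item[0][0], item[0][1]
--         cx, cy = x // 5, y // 5
--         dup = any(abs(px - x) < 5 and abs(py - y) < 5
--                   for dx in (-1, 0, 1)
--                   for dy in (-1, 0, 1)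
--                   for (px, py) in grid.get((cx + dx, cy + dy), ()))
--         if not dup:
--             out.append(item)
--         grid.setdefault((cx, cy), []).append((x, y))
--     return out
-- ===== Notes on version B (the rewrite author's own statement) =====
-- stated objective: faster
-- what changed: Replaces the all-pairs index scan plus sort-and-delete with a single pass over the list using a spatial hash grid of cell size 5 (each point queries only the 3x3 neighboring cells for an earlier near point) and builds the output directly instead of deleting marked indices; Pre_ excludes inputs of length >= 2 containing an entry whose first row is missing or shorter than 2, where A usually raises IndexError and only returns (unchanged) when its 'and' short-circuits, while B always reads both coordinates and raises.
-- outside the precondition, e.g. on filter_pos([[[0, 0]], [[9]]]): A returns [[[0, 0]], [[9]]], B raises IndexError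
import Mathlib
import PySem

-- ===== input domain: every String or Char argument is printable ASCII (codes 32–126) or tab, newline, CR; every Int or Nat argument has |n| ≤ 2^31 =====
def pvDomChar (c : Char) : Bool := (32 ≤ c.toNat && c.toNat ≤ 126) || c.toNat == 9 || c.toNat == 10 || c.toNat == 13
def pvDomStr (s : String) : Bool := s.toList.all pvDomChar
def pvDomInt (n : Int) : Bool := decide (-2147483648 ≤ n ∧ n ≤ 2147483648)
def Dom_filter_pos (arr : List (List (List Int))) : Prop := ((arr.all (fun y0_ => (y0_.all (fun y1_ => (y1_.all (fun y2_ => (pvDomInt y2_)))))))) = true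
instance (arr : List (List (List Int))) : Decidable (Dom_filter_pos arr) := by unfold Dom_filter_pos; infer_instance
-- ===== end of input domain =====

-- B replaces A's all-pairs scan + sort-and-delete with one pass over a spatial hash grid
-- (cell size 5, query the 3x3 neighbor cells); A mutates arr in place, B builds a new list —
-- the equivalence proved here is about the RETURN value only.

-- ===== PORT A =====
-- shared accessor for the Python expressions e[0][0] / e[0][1]
def pvPt (e : List (List Int)) : Int × Int :=
  (PySem.List.pyGetD (PySem.List.pyGetD e 0 []) 0 0,
   PySem.List.pyGetD (PySem.List.pyGetD e 0 []) 1 0)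

-- the Python test 'abs(ax-bx) < 5 and abs(ay-by) < 5'
def pvNear (a b : Int × Int) : Bool :=
  decide (|a.1 - b.1| < 5) && decide (|a.2 - b.2| < 5)

def filter_pos (arr : List (List (List Int))) : List (List (List Int)) :=
  let n : Int := arr.length
  let temp :=
    (PySem.List.pyRange 0 (n - 1) 1).foldl (fun tl p =>
      (PySem.List.pyRange (p + 1) n 1).foldl (fun tl k =>
        if pvNear (pvPt (PySem.List.pyGetD arr p [])) (pvPt (PySem.List.pyGetD arr k [])) then
          (if tl.contains k then tl else tl ++ [k])
        else tl) tl) ([] : List Int)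
  if temp ≠ [] then
    ((PySem.List.sorted temp (fun x => x) false).reverse).foldl
      (fun a s => ((PySem.List.pop? a s).map (·.2)).getD a) arr
  else arr

-- ===== PORT B =====
def pvCell (q : Int × Int) : Int × Int := (PySem.Int.floordiv q.1 5, PySem.Int.floordiv q.2 5)

def pvDup (grid : PySem.Dict (Int × Int) (List (Int × Int))) (c q : Int × Int) : Bool :=
  ([-1, 0, 1] : List Int).any fun dx =>
    ([-1, 0, 1] : List Int).any fun dy =>
      (grid.getD (c.1 + dx, c.2 + dy) []).any fun r => pvNear r q

def filter_pos_alt (arr : List (List (List Int))) : List (List (List Int)) :=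
  if arr.length ≤ 1 then arr else
  (arr.foldl
    (fun (st : PySem.Dict (Int × Int) (List (Int × Int)) × List (List (List Int))) item =>
      let q := pvPt item
      let c := pvCell q
      let out := if pvDup st.1 c q then st.2 else st.2 ++ [item]
      (st.1.insert c (st.1.getD c [] ++ [q]), out))
    (PySem.Dict.empty, ([] : List (List (List Int))))).2

-- ===== PRECONDITION & SPEC =====
-- Pre_ excludes inputs of length ≥ 2 containing an entry whose first row is missing or shorter
-- than 2: A usually raises IndexError there and only returns (arr unchanged) when its 'and'
-- short-circuits past the missing y-coordinate, while B always reads both coordinates and raises.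
def Pre_filter_pos (arr : List (List (List Int))) : Prop :=
  arr.length ≤ 1 ∨ ∀ e ∈ arr, e ≠ [] ∧ 2 ≤ (e.headD []).length
instance (arr : List (List (List Int))) : Decidable (Pre_filter_pos arr) := by
  unfold Pre_filter_pos; infer_instance

def pvWitness_filter_pos : List (List (List Int)) := [[[0, 0]], [[100, 100]]]

def Spec_filter_pos (arr : List (List (List Int))) (out : List (List (List Int))) : Prop := out = filter_pos_alt arr
instance (arr : List (List (List Int))) (out : List (List (List Int))) : Decidable (Spec_filter_pos arr out) := by unfold Spec_filter_pos; infer_instance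

-- ===== CLAIM (what is proved, stated in full; the proofs are below) =====
def Claim_equal_filter_pos : Prop := ∀ (arr : List (List (List Int))), Dom_filter_pos arr → Pre_filter_pos arr → Spec_filter_pos arr (filter_pos arr)

-- ===== LEMMAS AND PROOFS =====

lemma pv_inner_mem (cond : Int → Bool) (l : List Int) :
    ∀ (tl : List Int) (m : Int),
      m ∈ l.foldl (fun tl k => if cond k then (if tl.contains k then tl else tl ++ [k]) else tl) tl
      ↔ m ∈ tl ∨ (m ∈ l ∧ cond m = true) := by
  induction l with
  | nil => simp
  | cons k l ih =>
    intro tl m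
    simp only [List.foldl_cons, ih, List.mem_cons]
    split_ifs with h1 h2 <;> by_cases hm : m = k <;> simp_all

lemma pv_inner_nodup (cond : Int → Bool) (l : List Int) :
    ∀ (tl : List Int), tl.Nodup →
      (l.foldl (fun tl k => if cond k then (if tl.contains k then tl else tl ++ [k]) else tl) tl).Nodup := by
  induction l with
  | nil => simp
  | cons k l ih =>
    intro tl h
    simp only [List.foldl_cons]
    apply ih
    split_ifs with h1 h2
    · exact h
    · simp only [List.contains_eq_mem, Bool.not_eq_true, decide_eq_false_iff_not] at h2
      rw [List.nodup_append]
      refine ⟨h, by simp, by intro a ha b hb; simp at hb; subst hb; exact fun he => h2 (he ▸ ha)⟩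
    · exact h

lemma pv_outer_mem (cond : Int → Int → Bool) (n : Int) (ps : List Int) :
    ∀ (tl : List Int) (m : Int),
      m ∈ ps.foldl (fun tl p =>
            (PySem.List.pyRange (p + 1) n 1).foldl
              (fun tl k => if cond p k then (if tl.contains k then tl else tl ++ [k]) else tl) tl) tl
      ↔ m ∈ tl ∨ ∃ p ∈ ps, (p + 1 ≤ m ∧ m < n ∧ cond p m = true) := by
  induction ps with
  | nil => simp
  | cons p ps ih =>
    intro tl m
    simp only [List.foldl_cons, ih, pv_inner_mem, PySem.List.mem_pyRange_one, List.mem_cons]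
    constructor
    · rintro (((h | ⟨⟨h1, h2⟩, h3⟩) | ⟨q, hq, h⟩))
      · exact Or.inl h
      · exact Or.inr ⟨p, Or.inl rfl, h1, h2, h3⟩
      · exact Or.inr ⟨q, Or.inr hq, h⟩
    · rintro (h | ⟨q, (rfl | hq), h⟩)
      · exact Or.inl (Or.inl h)
      · exact Or.inl (Or.inr ⟨⟨h.1, h.2.1⟩, h.2.2⟩)
      · exact Or.inr ⟨q, hq, h⟩

lemma pv_outer_nodup (cond : Int → Int → Bool) (n : Int) (ps : List Int) :
    ∀ (tl : List Int), tl.Nodup →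
      (ps.foldl (fun tl p =>
            (PySem.List.pyRange (p + 1) n 1).foldl
              (fun tl k => if cond p k then (if tl.contains k then tl else tl ++ [k]) else tl) tl) tl).Nodup := by
  induction ps with
  | nil => simp
  | cons p ps ih =>
    intro tl h
    simp only [List.foldl_cons]
    exact ih _ (pv_inner_nodup _ _ _ h)

lemma pv_cell_close {a b : Int} (h : |a - b| < 5) :
    PySem.Int.floordiv a 5 - PySem.Int.floordiv b 5 = -1 ∨
    PySem.Int.floordiv a 5 - PySem.Int.floordiv b 5 = 0 ∨
    PySem.Int.floordiv a 5 - PySem.Int.floordiv b 5 = 1 := by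
  rw [abs_lt] at h
  rw [PySem.Int.floordiv_eq_ediv_of_pos (by norm_num), PySem.Int.floordiv_eq_ediv_of_pos (by norm_num)]
  omega

lemma pv_dup_eq_any (grid : PySem.Dict (Int × Int) (List (Int × Int))) (seen : List (Int × Int))
    (hinv : ∀ c, grid.getD c [] = seen.filter (fun r => pvCell r == c)) (q : Int × Int) :
    pvDup grid (pvCell q) q = seen.any (fun r => pvNear r q) := by
  rw [Bool.eq_iff_iff]
  simp only [pvDup, List.any_eq_true]
  constructor
  · rintro ⟨dx, _, dy, _, r, hr, hnear⟩
    rw [hinv] at hr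
    exact ⟨r, (List.mem_filter.mp hr).1, hnear⟩
  · rintro ⟨r, hr, hnear⟩
    have h1 : |r.1 - q.1| < 5 ∧ |r.2 - q.2| < 5 := by
      simpa [pvNear] using hnear
    refine ⟨(pvCell r).1 - (pvCell q).1, ?_, (pvCell r).2 - (pvCell q).2, ?_, r, ?_, hnear⟩
    · rcases pv_cell_close h1.1 with h | h | h <;> simp [pvCell] at h ⊢ <;> omega
    · rcases pv_cell_close h1.2 with h | h | h <;> simp [pvCell] at h ⊢ <;> omega
    · have : ((pvCell q).1 + ((pvCell r).1 - (pvCell q).1), (pvCell q).2 + ((pvCell r).2 - (pvCell q).2)) = pvCell r := by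
        simp
      rw [this, hinv]
      simp [List.mem_filter, hr]

def pvGo (seen : List (Int × Int)) : List (List (List Int)) → List (List (List Int))
  | [] => []
  | it :: rest =>
    if (seen.any fun r => pvNear r (pvPt it)) then pvGo (seen ++ [pvPt it]) rest
    else it :: pvGo (seen ++ [pvPt it]) rest

lemma pv_fold_eq_go (rest : List (List (List Int))) :
    ∀ (grid : PySem.Dict (Int × Int) (List (Int × Int))) (out : List (List (List Int)))
      (seen : List (Int × Int)),
      (∀ c, grid.getD c [] = seen.filter (fun r => pvCell r == c)) →
      (rest.foldl
        (fun (st : PySem.Dict (Int × Int) (List (Int × Int)) × List (List (List Int))) item =>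
          let q := pvPt item
          let c := pvCell q
          let out := if pvDup st.1 c q then st.2 else st.2 ++ [item]
          (st.1.insert c (st.1.getD c [] ++ [q]), out)) (grid, out)).2
      = out ++ pvGo seen rest := by
  induction rest with
  | nil => intro grid out seen _; simp [pvGo]
  | cons it rest ih =>
    intro grid out seen hinv
    simp only [List.foldl_cons]
    have hinv' : ∀ c, (grid.insert (pvCell (pvPt it)) (grid.getD (pvCell (pvPt it)) [] ++ [pvPt it])).getD c []
        = (seen ++ [pvPt it]).filter (fun r => pvCell r == c) := by
      intro c
      rw [PySem.Dict.getD_insert]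
      by_cases hc : c = pvCell (pvPt it)
      · simp [hc, hinv, List.filter_append]
      · simp only [if_neg hc, hinv, List.filter_append]
        have : (pvCell (pvPt it) == c) = false := by
          simp [Ne.symm hc]
        simp [this]
    rw [ih _ _ _ hinv']
    rw [pv_dup_eq_any grid seen hinv (pvPt it)]
    simp only [pvGo]
    by_cases hd : (seen.any fun r => pvNear r (pvPt it)) = true
    · simp [hd]
    · simp only [Bool.not_eq_true] at hd
      simp [hd]

lemma pv_del_foldl (ds : List Int) :
    ∀ (a : List (List (List Int))), ds.Pairwise (fun x y => y < x) →
      (∀ s ∈ ds, 0 ≤ s ∧ s < (a.length : Int)) →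
      ds.foldl (fun a s => ((PySem.List.pop? a s).map (·.2)).getD a) a
      = ((PySem.List.enumerate a 0).filter (fun p => !(ds.contains p.1))).map (·.2) := by
  induction ds with
  | nil =>
    intro a _ _
    simp [PySem.List.map_snd_enumerate]
  | cons s rest ih =>
    intro a hpw hrange
    have hs := hrange s List.mem_cons_self
    have hrest : ∀ t ∈ rest, t < s := fun t ht => (List.pairwise_cons.mp hpw).1 t ht
    have hj : s.toNat < a.length := by omega
    have hsj : s = (s.toNat : Int) := by omega
    have hpop : PySem.List.pop? a s = some (a[s.toNat], a.eraseIdx s.toNat) := by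
      conv_lhs => rw [hsj]
      exact PySem.List.pop?_natCast a s.toNat hj
    simp only [List.foldl_cons, hpop, Option.map_some, Option.getD_some]
    rw [ih (a.eraseIdx s.toNat) (List.pairwise_cons.mp hpw).2 ?hr]
    case hr =>
      intro t ht
      have h1 := hrange t (List.mem_cons_of_mem _ ht)
      have h2 := hrest t ht
      rw [List.length_eraseIdx_of_lt hj]
      omega
    -- decompose a around index s.toNat
    have hdec : a = a.take s.toNat ++ a[s.toNat] :: a.drop (s.toNat + 1) := by
      rw [List.getElem_cons_drop, List.take_append_drop]
    have herase : a.eraseIdx s.toNat = a.take s.toNat ++ a.drop (s.toNat + 1) :=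
      List.eraseIdx_eq_take_drop_succ a s.toNat
    have hlen : (a.take s.toNat).length = s.toNat := by
      simp [List.length_take, Nat.min_eq_left (Nat.le_of_lt hj)]
    -- index bounds of enumerate members
    have hmem : ∀ (xs : List (List (List Int))) (st : Int) (p : Int × List (List Int)),
        p ∈ PySem.List.enumerate xs st → st ≤ p.1 ∧ p.1 < st + xs.length := by
      intro xs st p hp
      rcases (PySem.List.mem_enumerate_iff _ _ _).mp hp with ⟨k, hk, rfl⟩
      simp
      omega
    rw [herase, PySem.List.enumerate_append]
    conv_rhs => rw [hdec, PySem.List.enumerate_append, PySem.List.enumerate_cons]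
    simp only [List.filter_append, List.map_append, hlen]
    congr 1
    · -- the prefix: predicates agree since indices are < s
      congr 1
      apply List.filter_congr
      intro p hp
      have := hmem _ _ _ hp
      have hne : (p.1 == s) = false := by
        simp only [beq_eq_false_iff_ne, ne_eq]
        omega
      show (!rest.contains p.1) = (!(s :: rest).contains p.1)
      rw [List.contains_cons, hne, Bool.false_or]
    · -- head dropped on the right; both tails filter to everything
      have hhead : (((0 : Int) + (s.toNat : Int), a[s.toNat]).1 == s) = true := by
        simp; omega
      rw [List.filter_cons]
      simp only [List.contains_cons, hhead, Bool.true_or, Bool.not_true]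
      simp only [if_neg (by simp : ¬ (false = true))]
      have hall : ∀ (st : Int)
          (pred : Int × List (List Int) → Bool),
          (∀ p ∈ PySem.List.enumerate (a.drop (s.toNat + 1)) st, pred p = true) →
          ((PySem.List.enumerate (a.drop (s.toNat + 1)) st).filter pred).map (·.2)
            = a.drop (s.toNat + 1) := by
        intro st pred hpred
        rw [List.filter_eq_self.mpr hpred, PySem.List.map_snd_enumerate]
      rw [hall ((0:Int) + (s.toNat:Int)) _ ?p1,
          hall ((0:Int) + (s.toNat:Int) + 1) _ ?p2]
      case p1 =>
        intro p hp
        have := hmem _ _ _ hp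
        have hni : p.1 ∉ rest := by
          intro hmem'
          have := hrest p.1 hmem'
          omega
        simp only [List.contains_eq_mem, Bool.not_eq_true', decide_eq_false_iff_not]
        exact hni
      case p2 =>
        intro p hp
        have := hmem _ _ _ hp
        have hni : p.1 ∉ s :: rest := by
          intro hmem'
          rcases List.mem_cons.mp hmem' with h' | h'
          · omega
          · have := hrest p.1 h'; omega
        simp only [List.mem_cons, not_or] at hni
        simp only [List.contains_eq_mem, Bool.not_eq_true',
          Bool.or_eq_false_iff, beq_eq_false_iff_ne, ne_eq, decide_eq_false_iff_not]
        exact hni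

lemma pv_filter_eq_go (f : Int → Bool) :
    ∀ (rest pre : List (List (List Int))),
      (∀ (k : Nat), k < rest.length →
        f ((pre.length : Int) + k) = ((pre ++ rest.take k).map pvPt).any
            (fun r => pvNear r (pvPt (rest.getD k [])))) →
      ((PySem.List.enumerate rest (pre.length : Int)).filter (fun p => !(f p.1))).map (·.2)
      = pvGo (pre.map pvPt) rest := by
  intro rest
  induction rest with
  | nil => intro pre _; simp [pvGo, PySem.List.enumerate_nil]
  | cons it rest ih =>
    intro pre hf
    have h0 : f (pre.length : Int) = (pre.map pvPt).any (fun r => pvNear r (pvPt it)) := by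
      have := hf 0 (by simp)
      simpa using this
    rw [PySem.List.enumerate_cons, List.filter_cons]
    have hstep : ∀ (k : Nat), k < rest.length →
        f (((pre ++ [it]).length : Int) + k) = (((pre ++ [it]) ++ rest.take k).map pvPt).any
            (fun r => pvNear r (pvPt (rest.getD k []))) := by
      intro k hk
      have := hf (k + 1) (by simp; omega)
      have harg : ((pre.length : Int)) + ((k : Int) + 1) = (((pre ++ [it]).length : Int)) + k := by
        simp
        omega
      simp only [List.take_succ_cons, List.getD_cons_succ] at this
      rw [← harg]
      push_cast at this ⊢
      rw [this]
      congr 1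
      simp
    have hih := ih (pre ++ [it]) hstep
    simp only [List.length_append, List.length_cons, List.length_nil] at hih
    push_cast at hih
    simp only [List.map_append, List.map_cons, List.map_nil] at hih
    simp only [pvGo, ← h0]
    by_cases hd : f (pre.length : Int) = true
    · simp [hd, hih]
    · simp only [Bool.not_eq_true] at hd
      simp [hd, hih]

-- proof-side names for A's loop condition and temp list (definitionally A's code)
def pvCondA (arr : List (List (List Int))) (p k : Int) : Bool :=
  pvNear (pvPt (PySem.List.pyGetD arr p [])) (pvPt (PySem.List.pyGetD arr k []))

def pvTempA (arr : List (List (List Int))) : List Int :=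
  (PySem.List.pyRange 0 ((arr.length : Int) - 1) 1).foldl (fun tl p =>
    (PySem.List.pyRange (p + 1) (arr.length : Int) 1).foldl (fun tl k =>
      if pvCondA arr p k then (if tl.contains k then tl else tl ++ [k]) else tl) tl) []

lemma pv_A_eq (arr : List (List (List Int))) :
    filter_pos arr =
      (if pvTempA arr ≠ [] then
        ((PySem.List.sorted (pvTempA arr) (fun x => x) false).reverse).foldl
          (fun a s => ((PySem.List.pop? a s).map (·.2)).getD a) arr
      else arr) := rfl

lemma pv_alt_eq_go (arr : List (List (List Int))) (h : ¬ arr.length ≤ 1) :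
    filter_pos_alt arr = pvGo [] arr := by
  unfold filter_pos_alt
  rw [if_neg h]
  rw [pv_fold_eq_go arr PySem.Dict.empty [] [] (fun c => rfl)]
  simp

-- ===== VERDICT (by name: the statement is the Claim_ definition above) =====
theorem filter_pos_spec : Claim_equal_filter_pos := by
  intro arr _ _
  unfold Spec_filter_pos
  rw [pv_A_eq]
  by_cases h1 : arr.length ≤ 1
  · -- both sides return arr unchanged
    have htemp : pvTempA arr = [] := by
      unfold pvTempA
      rw [PySem.List.pyRange_one_eq_nil (by omega)]
      rfl
    rw [htemp, if_neg (by simp)]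
    unfold filter_pos_alt
    rw [if_pos h1]
  · -- main case
    have hmemtemp : ∀ m : Int, m ∈ pvTempA arr ↔
        ∃ p : Int, 0 ≤ p ∧ p < m ∧ m < (arr.length : Int) ∧ pvCondA arr p m = true := by
      intro m
      unfold pvTempA
      rw [pv_outer_mem]
      simp only [List.not_mem_nil, false_or, PySem.List.mem_pyRange_one]
      constructor
      · rintro ⟨p, ⟨hp0, _⟩, hpm, hmn, hc⟩
        exact ⟨p, hp0, by omega, hmn, hc⟩
      · rintro ⟨p, hp0, hpm, hmn, hc⟩
        exact ⟨p, ⟨hp0, by omega⟩, by omega, hmn, hc⟩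
    have hnodup : (pvTempA arr).Nodup := pv_outer_nodup _ _ _ _ List.nodup_nil
    set ds : List Int := (PySem.List.sorted (pvTempA arr) (fun x => x) false).reverse with hds
    have hmemds : ∀ m : Int, m ∈ ds ↔ m ∈ pvTempA arr := by
      intro m
      rw [hds, List.mem_reverse, PySem.List.mem_sorted]
    have hpwds : ds.Pairwise (fun x y => y < x) := by
      rw [hds, List.pairwise_reverse]
      have hsorted : (PySem.List.sorted (pvTempA arr) (fun x => x) false).Pairwise (· ≤ ·) :=
        PySem.List.sorted_pairwise (pvTempA arr) (fun x => x)
      have hnd : (PySem.List.sorted (pvTempA arr) (fun x => x) false).Nodup :=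
        (PySem.List.sorted_perm (pvTempA arr) (fun x => x) false).nodup_iff.mpr hnodup
      exact (hsorted.and hnd).imp (fun h => lt_of_le_of_ne h.1 h.2)
    have hrange : ∀ s ∈ ds, 0 ≤ s ∧ s < (arr.length : Int) := by
      intro s hsmem
      rcases (hmemtemp s).mp ((hmemds s).mp hsmem) with ⟨p, hp0, hps, hsn, _⟩
      exact ⟨by omega, hsn⟩
    -- A's value as an index filter
    have hA : (if pvTempA arr ≠ [] then
          ds.foldl (fun a s => ((PySem.List.pop? a s).map (·.2)).getD a) arr
        else arr)
        = ((PySem.List.enumerate arr 0).filter (fun p => !(ds.contains p.1))).map (·.2) := by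
      by_cases ht : pvTempA arr = []
      · rw [if_neg (by simp [ht])]
        have hds0 : ds = [] := by rw [hds, ht]; rfl
        simp [hds0, PySem.List.map_snd_enumerate]
      · rw [if_pos ht]
        exact pv_del_foldl ds arr hpwds hrange
    rw [hA]
    -- the index filter is the one-pass specification
    have hf : ∀ (k : Nat), k < arr.length →
        (fun i => ds.contains i) ((((List.nil : List (List (List Int))).length : Nat) : Int) + k)
          = (((List.nil : List (List (List Int))) ++ arr.take k).map pvPt).any
              (fun r => pvNear r (pvPt (arr.getD k []))) := by
      intro k hk
      simp only [List.length_nil, Nat.cast_zero, zero_add, List.nil_append]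
      rw [Bool.eq_iff_iff]
      constructor
      · intro hc
        have hm : (k : Int) ∈ ds := by
          simpa [List.contains_eq_mem] using hc
        rcases (hmemtemp _).mp ((hmemds _).mp hm) with ⟨p, hp0, hpk, _, hcnd⟩
        have hpn : p.toNat < arr.length := by omega
        simp only [List.any_eq_true]
        refine ⟨pvPt arr[p.toNat], ?_, ?_⟩
        · simp only [List.mem_map]
          refine ⟨arr[p.toNat], ?_, rfl⟩
          rw [List.mem_take_iff_getElem]
          exact ⟨p.toNat, by omega, by simp⟩
        · unfold pvCondA at hcnd
          rw [PySem.List.pyGetD_eq_getElem arr (i := p) [] (by omega) (by omega),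
              show ((k : Int)) = ((k : Nat) : Int) from rfl,
              PySem.List.pyGetD_natCast] at hcnd
          rw [List.getD_eq_getElem arr [] hk] at hcnd ⊢
          exact hcnd
      · intro hany
        simp only [List.any_eq_true, List.mem_map] at hany
        rcases hany with ⟨r, ⟨x, hx, rfl⟩, hnear⟩
        rw [List.mem_take_iff_getElem] at hx
        rcases hx with ⟨j, hj, rfl⟩
        have hjk : j < k := by omega
        have hm : (k : Int) ∈ pvTempA arr := by
          rw [hmemtemp]
          refine ⟨(j : Int), by omega, by omega, by omega, ?_⟩
          unfold pvCondA
          rw [PySem.List.pyGetD_eq_getElem arr (i := (j : Int)) [] (by omega) (by omega),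
              PySem.List.pyGetD_natCast]
          rw [List.getD_eq_getElem arr [] hk]
          simpa [List.getElem?_eq_getElem hk] using hnear
        have : (k : Int) ∈ ds := (hmemds _).mpr hm
        simpa [List.contains_eq_mem] using this
    have hbridge := pv_filter_eq_go (fun i => ds.contains i) arr [] hf
    simp only [List.length_nil, Nat.cast_zero, List.map_nil] at hbridge
    rw [hbridge, ← pv_alt_eq_go arr h1]
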